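-- pv_equiv track=rewrite | github.com/jurekjurek/internship_BlockAggregation | finalAlgorithm/GetMatrixFromCircuit.py | calculate_new_col
-- ===== SOURCE A (Python) =====
-- def get_binary_representation(integer: int, size: int) -> str:
--     """Converts an integer to its binary representation with leading zeros, ensuring a fixed size.
--
--     This function takes an integer and converts it to its binary representation.
--     Leading zeros are added to the binary representation to ensure that the resulting
--     string always has the specified size. If the binary representation is too long to fit
--     within the desired size, a ValueError exception is raised.
--
--     Parameters
--     ----------
--     integer : int
--         The integer to be converted to binary.
--     size : int
--         The desired size of the binary representation string.
--
--     Returns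
--     -------
--     str
--         The binary representation of the integer as a string with leading zeros.
--
--     Raises
--     ------
--     ValueError
--         If the binary representation is too large for the given size.
--
--     Examples
--     --------
--     >>> get_binary_representation(5, 8)
--     '00000101'
--
--     >>> get_binary_representation(10, 6)
--     '010101'
--
--     >>> get_binary_representation(255, 8)
--     '11111111'
--     """
--     binary_string = bin(integer)[2:]  # Remove '0b' prefix from binary string
--
--     if len(binary_string) > size:
--         raise ValueError("Binary representation too large for the given size")
--
--     padded_binary_string = binary_string.rjust(size, '0')
--     return padded_binary_string
--
-- def calculate_new_col(col: int, index_map: dict) -> int: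
--     """Calculates the new column for column col, given an index_map
--     which maps old qubit indices to their new qubit indices.
--
--     The column in a density matrix shaped matrix (2^n x 2^n) that transforms
--     a representation of a state vector (size 2^n) where element i represents the
--     qubit state i.to_binary(), e.g. i = 3 corresponds to state 0..011. The
--     index_map maps each position in the binary representation to a new position.
--     The resulting binary value is then converted back to a decimal value which
--     corresponds to the new column that is returned.
--
--     Parameters
--     ----------
--     col : int
--         Old column in a matrix of size 2^n x 2^n.
--     index_map : dict
--         Map which maps the old qubit index to the new qubit index.
--
--     Returns
--     -------
--     int
--         New column.
--     """
--     num_qb = len(index_map.values())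
--
--     # get the binary representation of the old column
--     state = get_binary_representation(col, num_qb)
--
--     # sort the index_map to be ascending in the values to
--     # simply iterate over it and build up the new state
--     sorted_index_map = dict(sorted(index_map.items(), key=lambda item: item[1]))
--
--     new_state = ''
--     for old_index in sorted_index_map.keys():
--         new_state += state[old_index]
--
--     return int(new_state, base=2)
-- ===== SOURCE B (Python) =====
-- def get_binary_representation(integer: int, size: int) -> str:
--     binary_string = bin(integer)[2:]
--     if len(binary_string) > size:
--         raise ValueError("Binary representation too large for the given size")
--     return binary_string.rjust(size, '0')
--
-- def calculate_new_col(col: int, index_map: dict) -> int: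
--     # scatter by rank instead of sort-then-gather: each old bit goes directly to
--     # position = number of map entries with a smaller value (earlier entries win ties)
--     num_qb = len(index_map)
--     state = get_binary_representation(col, num_qb)
--     items = list(index_map.items())
--     result = [None] * num_qb
--     for i, (old_index, value) in enumerate(items):
--         rank = sum(1 for j, (_, v) in enumerate(items) if v < value or (v == value and j < i))
--         result[rank] = state[old_index]
--     return int(''.join(result), 2)
-- ===== Notes on version B (the rewrite author's own statement) =====
-- stated objective: alternative
-- what changed: Replaces the sort-by-value-then-gather (append state chars in ascending order of the map's values) by a direct scatter: for each entry, compute its rank by counting entries with smaller value (earlier entries win ties) and write result[rank] = state[old_index]; no sorting, the output is built by position instead of by appending.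
-- outside the precondition, e.g. on calculate_new_col(-1, {1: 0, -1: 1}): A returns 3, B returns 3
import Mathlib
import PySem

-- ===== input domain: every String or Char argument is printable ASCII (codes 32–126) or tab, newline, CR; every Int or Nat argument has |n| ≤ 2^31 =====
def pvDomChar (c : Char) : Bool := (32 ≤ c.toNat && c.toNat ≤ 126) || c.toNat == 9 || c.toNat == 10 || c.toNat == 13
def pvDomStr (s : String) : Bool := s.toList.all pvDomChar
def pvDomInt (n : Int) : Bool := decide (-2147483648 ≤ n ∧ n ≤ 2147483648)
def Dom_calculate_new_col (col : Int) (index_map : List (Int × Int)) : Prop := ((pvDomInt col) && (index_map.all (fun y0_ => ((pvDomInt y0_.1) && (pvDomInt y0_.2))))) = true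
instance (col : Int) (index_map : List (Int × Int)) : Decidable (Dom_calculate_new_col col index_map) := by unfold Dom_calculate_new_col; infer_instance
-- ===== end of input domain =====

-- B replaces A's sort-by-value-then-gather by a rank-based scatter (result[rank of value] = state[old_index]).

-- ===== PORT A =====
-- get_binary_representation: bin(integer)[2:], length check (ValueError → none), rjust(size, '0')
def pvBinRep (integer size : Int) : Option (List Char) :=
  let binary_string := (PySem.Int.toBinChars0b integer).drop 2
  if (binary_string.length : Int) > size then none
  else some (List.replicate (size - (binary_string.length : Int)).toNat '0' ++ binary_string)

def calculate_new_col (col : Int) (index_map : List (Int × Int)) : Int :=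
  let num_qb : Int := (index_map.length : Int)
  match pvBinRep col num_qb with
  | none => 0  -- ValueError; excluded by Pre_
  | some state =>
    let sorted_index_map := PySem.List.sorted index_map (fun item => item.2) false
    match sorted_index_map.foldl
        (fun acc p => match acc, PySem.List.pyGet? state p.1 with
          | some s, some ch => some (s ++ [ch])
          | _, _ => none) (some ([] : List Char)) with
    | none => 0  -- IndexError; excluded by Pre_
    | some new_state => (PySem.Int.ofCharsBase? new_state 2).getD 0  -- int(new_state, base=2); ValueError excluded by Pre_

-- ===== PORT B =====
-- B's own copy of get_binary_representation (Source B defines it itself)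
def pvBinRepB (integer size : Int) : Option (List Char) :=
  let binary_string := (PySem.Int.toBinChars0b integer).drop 2
  if (binary_string.length : Int) > size then none
  else some (List.replicate (size - (binary_string.length : Int)).toNat '0' ++ binary_string)

-- ''.join(result) with possible None holes (TypeError → none)
def pvSeq : List (Option Char) → Option (List Char)
  | [] => some []
  | none :: _ => none
  | some ch :: rest => (pvSeq rest).map (ch :: ·)

-- Source B's loop body: rank = sum(1 for j, (_, v) in enumerate(items) if v < value or (v == value and j < i));
-- result[rank] = state[old_index].  enumerate(items) is items.zipIdx (index in the second component).
def calculate_new_col_alt (col : Int) (index_map : List (Int × Int)) : Int :=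
  let num_qb : Int := (index_map.length : Int)
  ((pvBinRepB col num_qb).bind (fun state =>
    let items := index_map
    ((items.zipIdx).foldl (fun acc iq =>
        let rank : Int := ((items.zipIdx).map (fun jq =>
          if jq.1.2 < iq.1.2 ∨ (jq.1.2 = iq.1.2 ∧ jq.2 < iq.2) then (1 : Int) else 0)).sum
        acc.bind (fun r => (PySem.List.pyGet? state iq.1.1).bind (fun ch =>
          PySem.List.pySet? r rank (some ch))))
      (some (List.replicate num_qb.toNat (none : Option Char)))).bind (fun r =>
      (pvSeq r).bind (fun new_state =>
        PySem.Int.ofCharsBase? new_state 2)))).getD 0  -- none = ValueError/IndexError/TypeError; excluded by Pre_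

-- ===== PRECONDITION & SPEC =====
-- Pre_ is exactly where the Python A returns normally, minus two unreachable/degenerate corners: it excludes
-- negative col (A then almost always raises ValueError because the 'b' of bin's '-0b' prefix lands in the parsed
-- string; in the rare corner where every gathered index dodges the 'b' both A and B return the same value), the
-- inputs where A raises (col ≥ 2^n, empty map, key out of range), and association lists with duplicate keys,
-- which no Python dict can produce.
def Pre_calculate_new_col (col : Int) (index_map : List (Int × Int)) : Prop :=
  0 ≤ col ∧ col < 2 ^ index_map.length ∧ index_map ≠ [] ∧
  (index_map.map Prod.fst).Nodup ∧
  (∀ p ∈ index_map, -(index_map.length : Int) ≤ p.1 ∧ p.1 < (index_map.length : Int))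

instance (col : Int) (index_map : List (Int × Int)) : Decidable (Pre_calculate_new_col col index_map) := by
  unfold Pre_calculate_new_col; infer_instance

def pvWitness_calculate_new_col : Int × (List (Int × Int)) := (5, [(0, 1), (1, 2), (2, 0)])

def Spec_calculate_new_col (col : Int) (index_map : List (Int × Int)) (out : Int) : Prop := out = calculate_new_col_alt col index_map
instance (col : Int) (index_map : List (Int × Int)) (out : Int) : Decidable (Spec_calculate_new_col col index_map out) := by unfold Spec_calculate_new_col; infer_instance

-- ===== CLAIM (what is proved, stated in full; the proofs are below) =====
def Claim_equal_calculate_new_col : Prop := ∀ (col : Int) (index_map : List (Int × Int)), Dom_calculate_new_col col index_map → Pre_calculate_new_col col index_map → Spec_calculate_new_col col index_map (calculate_new_col col index_map)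

-- ===== LEMMAS AND PROOFS =====

-- the character A and B both fetch for a pair p (total form; under Pre_ the lookup succeeds)
def pvChar (state : List Char) (p : Int × Int) : Char := (PySem.List.pyGet? state p.1).getD 'x'

-- Source B's rank of the entry (value v, position i): entries with smaller value, earlier entries winning ties
def pvRank (l : List (Int × Int)) (v : Int) (i : Nat) : Nat :=
  (l.zipIdx).countP (fun jq => decide (jq.1.2 < v ∨ (jq.1.2 = v ∧ jq.2 < i)))

theorem pvBinRepB_eq (integer size : Int) : pvBinRepB integer size = pvBinRep integer size := rfl

theorem pvBinRep_length {integer size : Int} {state : List Char}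
    (h : pvBinRep integer size = some state) : state.length = size.toNat := by
  simp only [pvBinRep] at h
  split at h
  · cases h
  · rename_i hle
    cases h
    simp only [List.length_append, List.length_replicate]
    omega

theorem pv_gather_eq (state : List Char) (l : List (Int × Int)) (acc : List Char)
    (h : ∀ p ∈ l, PySem.List.pyGet? state p.1 ≠ none) :
    l.foldl (fun acc p => match acc, PySem.List.pyGet? state p.1 with
          | some s, some ch => some (s ++ [ch])
          | _, _ => none) (some acc)
      = some (acc ++ l.map (pvChar state)) := by
  induction l generalizing acc with
  | nil => simp
  | cons p t ih =>
    obtain ⟨ch, hch⟩ := Option.ne_none_iff_exists'.mp (h p (by simp))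
    simp only [List.foldl_cons, hch]
    rw [ih (acc ++ [ch]) (fun q hq => h q (by simp [hq]))]
    simp [pvChar, hch]

theorem pv_pySet?_nonneg {α : Type} (r : List α) (i : Int) (v : α)
    (h0 : 0 ≤ i) (h1 : i < (r.length : Int)) :
    PySem.List.pySet? r i v = some (r.set i.toNat v) := by
  have hne : PySem.List.pySet? r i v ≠ none := by
    intro hno
    rw [PySem.List.pySet?_eq_none_iff] at hno
    exact hno ⟨by omega, h1⟩
  obtain ⟨y, hy⟩ := Option.ne_none_iff_exists'.mp hne
  have hyd : PySem.List.pySetD r i v = y := by simp [PySem.List.pySetD, hy]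
  rw [hy, ← hyd]
  exact congrArg some (PySem.List.pySetD_of_nonneg r v h0)

-- B's scatter loop with all lookups and writes in range = a plain fold of List.set
-- (g b = the looked-up char, w b = the write position)
theorem pv_scatter_eq {β : Type} (g : β → Option Char) (w : β → Int) (L : List β) (r : List (Option Char))
    (hk : ∀ b ∈ L, g b ≠ none)
    (hv : ∀ b ∈ L, 0 ≤ w b ∧ w b < (r.length : Int)) :
    L.foldl (fun acc b => acc.bind (fun r => (g b).bind (fun ch => PySem.List.pySet? r (w b) (some ch)))) (some r)
      = some (L.foldl (fun r b => r.set (w b).toNat (some ((g b).getD 'x'))) r) := by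
  induction L generalizing r with
  | nil => simp
  | cons b t ih =>
    obtain ⟨ch, hch⟩ := Option.ne_none_iff_exists'.mp (hk b (by simp))
    have hv0 := hv b (by simp)
    simp only [List.foldl_cons, hch, Option.bind_some]
    rw [pv_pySet?_nonneg r (w b) (some ch) hv0.1 hv0.2]
    rw [ih (r.set (w b).toNat (some ch)) (fun q hq => hk q (by simp [hq]))
        (fun q hq => by simpa using hv q (by simp [hq]))]
    simp [hch]

theorem pv_scatter_length {β : Type} (cv : β → Char) (w : β → Nat) (L : List β) (r : List (Option Char)) :
    (L.foldl (fun r b => r.set (w b) (some (cv b))) r).length = r.length := by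
  induction L generalizing r with
  | nil => rfl
  | cons b t ih => simp [List.foldl_cons, ih]

theorem pv_scatter_preserve {β : Type} (cv : β → Char) (w : β → Nat) (L : List β) (r : List (Option Char)) (j : Nat)
    (h : ∀ b ∈ L, w b ≠ j) :
    (L.foldl (fun r b => r.set (w b) (some (cv b))) r)[j]? = r[j]? := by
  induction L generalizing r with
  | nil => rfl
  | cons b t ih =>
    simp only [List.foldl_cons]
    rw [ih _ (fun q hq => h q (by simp [hq]))]
    exact List.getElem?_set_ne (h b (by simp))

theorem pv_scatter_getElem {β : Type} (cv : β → Char) (w : β → Nat) (L : List β) (r : List (Option Char))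
    (q : β) (hnd : (L.map w).Nodup) (hq : q ∈ L)
    (hv : ∀ b ∈ L, w b < r.length) :
    (L.foldl (fun r b => r.set (w b) (some (cv b))) r)[w q]?
      = some (some (cv q)) := by
  induction L generalizing r with
  | nil => cases hq
  | cons b t ih =>
    simp only [List.foldl_cons]
    have hnd' : (t.map w).Nodup := by
      simp only [List.map_cons, List.nodup_cons] at hnd
      exact hnd.2
    by_cases hqt : q ∈ t
    · exact ih _ hnd' hqt (fun q' hq' => by simpa using hv q' (List.mem_cons_of_mem _ hq'))
    · have hqp : q = b := by
        rcases List.mem_cons.mp hq with h | h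
        · exact h
        · exact absurd h hqt
      subst hqp
      have hw : ∀ b' ∈ t, w b' ≠ w q := by
        intro b' hb' he
        have hm : w q ∈ t.map w := he ▸ List.mem_map_of_mem hb'
        simp only [List.map_cons, List.nodup_cons] at hnd
        exact hnd.1 hm
      rw [pv_scatter_preserve cv w t _ (w q) (fun b' hb' => hw b' hb')]
      exact List.getElem?_set_self (hv q (by simp))

theorem pvSeq_map_some (xs : List Char) : pvSeq (xs.map some) = some xs := by
  induction xs with
  | nil => rfl
  | cons c t ih => simp [pvSeq, ih]

-- counting: if P implies Q on l and some member satisfies Q but not P, the P-count is strictly smaller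
theorem pv_countP_lt {α : Type} (l : List α) (P Q : α → Bool)
    (hPQ : ∀ x ∈ l, P x = true → Q x = true) (e : α) (he : e ∈ l) (hQ : Q e = true) (hP : ¬ P e = true) :
    l.countP P < l.countP Q := by
  induction l with
  | nil => cases he
  | cons x t ih =>
    rw [List.countP_cons, List.countP_cons]
    have hmono : t.countP P ≤ t.countP Q :=
      List.countP_mono_left (fun y hy => hPQ y (List.mem_cons_of_mem _ hy))
    have hx : (if P x = true then 1 else 0) ≤ (if Q x = true then 1 else 0) := by
      by_cases h : P x = true
      · simp [h, hPQ x (by simp) h]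
      · simp [h]
    rcases List.mem_cons.mp he with rfl | het
    · rw [if_pos hQ, if_neg hP]
      omega
    · have := ih (fun y hy => hPQ y (List.mem_cons_of_mem _ hy)) het
      omega

-- a countP over enumerate(items) whose predicate ignores the index is a countP over items
theorem pv_countP_zipIdx {α : Type} (l : List α) (k : Nat) (p : α → Bool) :
    (l.zipIdx k).countP (fun jq => p jq.1) = l.countP p := by
  induction l generalizing k with
  | nil => rfl
  | cons x t ih => simp [List.zipIdx_cons, List.countP_cons, ih]

-- where insertBy puts the new element into an already-sorted list
theorem pv_insertBy_eq (a : Int × Int) (s : List (Int × Int))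
    (hs : s.Pairwise (fun x y => x.2 ≤ y.2)) :
    PySem.List.insertBy (fun x y => decide (x.2 < y.2)) a s
      = s.take (s.countP (fun y => !decide (a.2 < y.2))) ++ a :: s.drop (s.countP (fun y => !decide (a.2 < y.2))) := by
  induction s with
  | nil => rfl
  | cons y t ih =>
    rw [List.pairwise_cons] at hs
    by_cases h : a.2 < y.2
    · have hcount : List.countP (fun z => !decide (a.2 < z.2)) (y :: t) = 0 := by
        rw [List.countP_eq_zero]
        intro z hz
        rcases List.mem_cons.mp hz with rfl | hzt
        · simp [h]
        · simp [lt_of_lt_of_le h (hs.1 z hzt)]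
      rw [hcount]
      simp [PySem.List.insertBy, h]
    · rw [List.countP_cons_of_pos (by simp [h])]
      have hstep : PySem.List.insertBy (fun x y => decide (x.2 < y.2)) a (y :: t)
          = y :: PySem.List.insertBy (fun x y => decide (x.2 < y.2)) a t := by
        simp [PySem.List.insertBy, h]
      rw [hstep, ih hs.2]
      simp [List.take_succ_cons, List.drop_succ_cons]

-- indexing the list take m ++ a :: drop m
theorem pv_insert_getElem? {α : Type} (s : List α) (a : α) (m k : Nat) (hm : m ≤ s.length) :
    (s.take m ++ a :: s.drop m)[k]? =
      if k < m then s[k]? else if k = m then some a else s[k - 1]? := by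
  have hlt : (s.take m).length = m := by simp [hm]
  split_ifs with h1 h2
  · rw [List.getElem?_append_left (by omega), List.getElem?_take]
    simp [h1]
  · subst h2
    rw [List.getElem?_append_right (by omega), hlt]
    simp
  · rw [List.getElem?_append_right (by omega), hlt]
    have hk : k - m = (k - m - 1) + 1 := by omega
    rw [hk, List.getElem?_cons_succ, List.getElem?_drop]
    congr 1
    omega

-- index bound and value of every entry of enumerate(l)
theorem pv_mem_zipIdx {α : Type} {q : α × Nat} {l : List α} (h : q ∈ l.zipIdx) :
    q.2 < l.length ∧ l[q.2]? = some q.1 := by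
  have h1 := List.mem_zipIdx_iff_getElem?.mp h
  refine ⟨?_, h1⟩
  by_contra hc
  rw [List.getElem?_eq_none (by omega)] at h1
  cases h1

theorem pv_zipIdx_nodup {α : Type} (l : List α) (k : Nat) : (l.zipIdx k).Nodup := by
  induction l generalizing k with
  | nil => simp
  | cons x t ih =>
    rw [List.zipIdx_cons, List.nodup_cons]
    refine ⟨fun hmem => ?_, ih (k + 1)⟩
    have := (List.mem_zipIdx hmem).1
    omega

-- STABILITY of the sorted gather: the element at position rank(i) of sorted(l, key=value) is l[i]
theorem pv_stable (l : List (Int × Int)) :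
    ∀ i, (hi : i < l.length) →
      pvRank l l[i].2 i < l.length ∧
      (PySem.List.sorted l (fun item => item.2) false)[pvRank l l[i].2 i]? = some l[i] := by
  induction l using List.reverseRecOn with
  | nil => intro i hi; simp at hi
  | append_singleton t a ih =>
    intro i hi
    have hsfold : PySem.List.sorted (t ++ [a]) (fun item => item.2) false
        = PySem.List.insertBy (fun x y => decide (x.2 < y.2)) a (PySem.List.sorted t (fun item => item.2) false) := by
      rw [PySem.List.sorted_eq_foldl_insertBy, List.foldl_append, ← PySem.List.sorted_eq_foldl_insertBy]
      rfl
    set s := PySem.List.sorted t (fun item => item.2) false with hsdef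
    have hslen : s.length = t.length := PySem.List.length_sorted t _ false
    have hsp : s.Pairwise (fun x y => x.2 ≤ y.2) := PySem.List.sorted_pairwise t (fun item => item.2)
    set m := s.countP (fun y => !decide (a.2 < y.2)) with hmdef
    have hmlen : m ≤ s.length := List.countP_le_length
    have hmt : m = t.countP (fun y => !decide (a.2 < y.2)) :=
      (PySem.List.sorted_perm t (fun item => item.2) false).countP_eq _
    have hins : PySem.List.sorted (t ++ [a]) (fun item => item.2) false
        = s.take m ++ a :: s.drop m := by
      rw [hsfold, pv_insertBy_eq a s hsp]
    have hz : (t ++ [a]).zipIdx = t.zipIdx ++ [(a, t.length)] := by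
      rw [List.zipIdx_append]
      simp [List.zipIdx_cons]
    simp only [List.length_append, List.length_singleton] at hi
    by_cases hi2 : i < t.length
    · have hgl : (t ++ [a])[i]'(by simp; omega) = t[i] := List.getElem_append_left hi2
      obtain ⟨hb, hval⟩ := ih i hi2
      have hrank : pvRank (t ++ [a]) t[i].2 i
          = pvRank t t[i].2 i + (if a.2 < t[i].2 then 1 else 0) := by
        unfold pvRank
        rw [hz, List.countP_append]
        congr 1
        by_cases ha : a.2 < t[i].2
        · simp [List.countP_cons, ha]
        · have hno : ¬ (a.2 < t[i].2 ∨ (a.2 = t[i].2 ∧ t.length < i)) := by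
            intro hcon
            rcases hcon with h1 | h1
            · exact ha h1
            · omega
          simp [List.countP_cons, hno, ha]
          intro _
          omega
      rw [hgl, hrank]
      by_cases ha : a.2 < t[i].2
      · -- new element sorts strictly before l[i]: position shifts by one
        have hmle : m ≤ pvRank t t[i].2 i := by
          rw [hmt, ← pv_countP_zipIdx t 0 (fun y => !decide (a.2 < y.2))]
          exact List.countP_mono_left (fun jq hjq hp => by
            simp only [Bool.not_eq_eq_eq_not, Bool.not_true, decide_eq_false_iff_not, not_lt] at hp
            simp only [decide_eq_true_eq]
            left
            omega)
        rw [if_pos ha, hins, pv_insert_getElem? s a m _ hmlen]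
        rw [if_neg (by omega), if_neg (by omega)]
        constructor
        · simp; omega
        · simpa using hval
      · -- new element sorts after (or ties with) l[i]: position unchanged
        have hmgt : pvRank t t[i].2 i < m := by
          rw [hmt, ← pv_countP_zipIdx t 0 (fun y => !decide (a.2 < y.2))]
          refine pv_countP_lt _ _ _ (fun jq hjq hp => ?_) (t[i], i)
            (List.mem_zipIdx_iff_getElem?.mpr (by simp [List.getElem?_eq_getElem hi2])) (by simp; omega) (by simp)
          simp only [decide_eq_true_eq] at hp
          simp only [Bool.not_eq_eq_eq_not, Bool.not_true, decide_eq_false_iff_not, not_lt]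
          rcases hp with h1 | h1
          · omega
          · omega
        rw [if_neg ha, hins, pv_insert_getElem? s a m _ hmlen]
        rw [if_pos (by omega)]
        constructor
        · simp; omega
        · simpa using hval
    · -- i = t.length: the appended element itself
      have hieq : i = t.length := by omega
      subst hieq
      have hgl : (t ++ [a])[t.length]'(by simp) = a := by
        simp
      rw [hgl]
      have hrank : pvRank (t ++ [a]) a.2 t.length = m := by
        unfold pvRank
        rw [hz, List.countP_append]
        have hself : List.countP (fun jq => decide (jq.1.2 < a.2 ∨ (jq.1.2 = a.2 ∧ jq.2 < t.length)))
            [(a, t.length)] = 0 := by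
          simp
        rw [hself, hmt, ← pv_countP_zipIdx t 0 (fun y => !decide (a.2 < y.2))]
        refine Nat.add_zero _ ▸ List.countP_congr (fun jq hjq => ?_)
        have hjlt := (pv_mem_zipIdx hjq).1
        simp only [decide_eq_true_eq, Bool.not_eq_eq_eq_not, Bool.not_true, decide_eq_false_iff_not, not_lt]
        constructor
        · intro h; rcases h with h | h <;> omega
        · intro h
          rcases Int.lt_or_le jq.1.2 a.2 with h1 | h1
          · exact Or.inl h1
          · exact Or.inr ⟨by omega, hjlt⟩
      rw [hrank, hins, pv_insert_getElem? s a m _ hmlen]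
      rw [if_neg (by omega), if_pos rfl]
      constructor
      · simp; omega
      · rfl

-- strict monotonicity of the rank in the (value, position) lexicographic order
theorem pv_rank_lt (l : List (Int × Int)) (i i' : Nat) (hi : i < l.length) (hi' : i' < l.length)
    (hlex : l[i].2 < l[i'].2 ∨ (l[i].2 = l[i'].2 ∧ i < i')) :
    pvRank l l[i].2 i < pvRank l l[i'].2 i' := by
  unfold pvRank
  refine pv_countP_lt _ _ _ (fun jq hjq hp => ?_) (l[i], i)
    (List.mem_zipIdx_iff_getElem?.mpr (by simp [List.getElem?_eq_getElem hi])) ?_ ?_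
  · simp only [decide_eq_true_eq] at hp ⊢
    rcases hp with h1 | h1
    · rcases hlex with h2 | h2
      · exact Or.inl (by omega)
      · exact Or.inl (by omega)
    · rcases hlex with h2 | h2
      · exact Or.inl (by omega)
      · exact Or.inr ⟨by omega, by omega⟩
  · simp only [decide_eq_true_eq]
    rcases hlex with h2 | h2
    · exact Or.inl h2
    · exact Or.inr ⟨h2.1, h2.2⟩
  · simp

theorem pv_rank_ne (l : List (Int × Int)) (i i' : Nat) (hi : i < l.length) (hi' : i' < l.length)
    (hne : i ≠ i') : pvRank l l[i].2 i ≠ pvRank l l[i'].2 i' := by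
  rcases lt_trichotomy l[i].2 l[i'].2 with h | h | h
  · exact Nat.ne_of_lt (pv_rank_lt l i i' hi hi' (Or.inl h))
  · rcases Nat.lt_or_ge i i' with h2 | h2
    · exact Nat.ne_of_lt (pv_rank_lt l i i' hi hi' (Or.inr ⟨h, h2⟩))
    · exact (Nat.ne_of_lt (pv_rank_lt l i' i hi' hi (Or.inr ⟨h.symm, by omega⟩))).symm
  · exact (Nat.ne_of_lt (pv_rank_lt l i' i hi' hi (Or.inl h))).symm

-- ===== VERDICT (by name: the statement is the Claim_ definition above) =====
theorem calculate_new_col_spec : Claim_equal_calculate_new_col := by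
  intro col index_map _ hpre
  obtain ⟨_, _, _, _, hkeys⟩ := hpre
  unfold Spec_calculate_new_col calculate_new_col calculate_new_col_alt
  cases hbin : pvBinRep col (index_map.length : Int) with
  | none => simp only [hbin, pvBinRepB_eq, Option.bind_none, Option.getD_none]
  | some state =>
    simp only [hbin, pvBinRepB_eq, Option.bind_some]
    have hlen : state.length = index_map.length := by
      simpa using pvBinRep_length hbin
    have hget : ∀ p ∈ index_map, PySem.List.pyGet? state p.1 ≠ none := by
      intro p hp hno
      rw [PySem.List.pyGet?_eq_none_iff] at hno
      have := hkeys p hp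
      exact hno ⟨by rw [hlen]; omega, by rw [hlen]; omega⟩
    -- A's gather
    rw [pv_gather_eq state _ []
      (fun p hp => hget p ((PySem.List.mem_sorted _ _ _ p).mp hp))]
    -- B's loop: rewrite the inline rank-sum into pvRank
    have hfold := PySem.List.foldl_congr_mem (index_map.zipIdx)
      (fun acc iq =>
        let rank : Int := ((index_map.zipIdx).map (fun jq =>
          if jq.1.2 < iq.1.2 ∨ (jq.1.2 = iq.1.2 ∧ jq.2 < iq.2) then (1 : Int) else 0)).sum
        acc.bind (fun r => (PySem.List.pyGet? state iq.1.1).bind (fun ch =>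
          PySem.List.pySet? r rank (some ch))))
      (fun acc iq => acc.bind (fun r => (PySem.List.pyGet? state iq.1.1).bind (fun ch =>
          PySem.List.pySet? r ((pvRank index_map iq.1.2 iq.2 : Nat) : Int) (some ch))))
      (some (List.replicate (index_map.length : Int).toNat (none : Option Char)))
      (fun acc iq _ => by
        have hsum : ((index_map.zipIdx).map (fun jq =>
            if jq.1.2 < iq.1.2 ∨ (jq.1.2 = iq.1.2 ∧ jq.2 < iq.2) then (1 : Int) else 0)).sum
            = ((pvRank index_map iq.1.2 iq.2 : Nat) : Int) := by
          have hfe : (fun (jq : (Int × Int) × Nat) =>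
              if jq.1.2 < iq.1.2 ∨ (jq.1.2 = iq.1.2 ∧ jq.2 < iq.2) then (1 : Int) else 0)
              = (fun jq => if (fun (jq : (Int × Int) × Nat) => decide (jq.1.2 < iq.1.2 ∨ (jq.1.2 = iq.1.2 ∧ jq.2 < iq.2))) jq = true then (1 : Int) else 0) := by
            funext jq
            simp
          rw [hfe, PySem.List.sum_map_ite_one_zero]
          rfl
        simp only [hsum])
    rw [hfold]
    have hvw : ∀ iq ∈ index_map.zipIdx,
        0 ≤ ((pvRank index_map iq.1.2 iq.2 : Nat) : Int) ∧
        ((pvRank index_map iq.1.2 iq.2 : Nat) : Int) < ((List.replicate (index_map.length : Int).toNat (none : Option Char)).length : Int) := by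
      intro iq hiq
      obtain ⟨hjlt, hjget⟩ := pv_mem_zipIdx hiq
      have hq1 : index_map[iq.2] = iq.1 := by
        have := List.getElem?_eq_getElem hjlt
        rw [this] at hjget
        exact Option.some.inj hjget
      have := (pv_stable index_map iq.2 hjlt).1
      rw [hq1] at this
      constructor
      · omega
      · simp only [List.length_replicate]
        omega
    rw [pv_scatter_eq (fun iq => PySem.List.pyGet? state iq.1.1)
      (fun iq => ((pvRank index_map iq.1.2 iq.2 : Nat) : Int)) index_map.zipIdx _
      (fun iq hiq => hget iq.1 (by
        obtain ⟨hjlt, hjget⟩ := pv_mem_zipIdx hiq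
        exact (List.mem_iff_getElem?.mpr ⟨iq.2, hjget⟩)))
      hvw]
    have hlam : (fun (r : List (Option Char)) (iq : (Int × Int) × Nat) =>
        r.set ((pvRank index_map iq.1.2 iq.2 : Nat) : Int).toNat
          (some ((PySem.List.pyGet? state iq.1.1).getD 'x')))
        = (fun (r : List (Option Char)) (iq : (Int × Int) × Nat) =>
        r.set (pvRank index_map iq.1.2 iq.2) (some ((PySem.List.pyGet? state iq.1.1).getD 'x'))) := by
      funext r iq
      simp
    rw [hlam]
    have hvwN : ∀ iq ∈ index_map.zipIdx,
        pvRank index_map iq.1.2 iq.2 < (List.replicate (index_map.length : Int).toNat (none : Option Char)).length := by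
      intro iq hiq
      have := hvw iq hiq
      omega
    -- the scattered list is the sorted gather, elementwise
    have heq :
        index_map.zipIdx.foldl (fun r iq =>
            r.set (pvRank index_map iq.1.2 iq.2)
              (some ((PySem.List.pyGet? state iq.1.1).getD 'x')))
            (List.replicate (index_map.length : Int).toNat (none : Option Char))
          = ((PySem.List.sorted index_map (fun item => item.2) false).map (pvChar state)).map some := by
      apply List.ext_getElem?
      intro j
      by_cases hj : j < index_map.length
      · -- find the entry whose rank is j (the rank map Fin n → Fin n is injective, hence surjective)
        have hinj : Function.Injective (fun i : Fin index_map.length =>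
            (⟨pvRank index_map index_map[i.1].2 i.1, (pv_stable index_map i.1 i.2).1⟩ : Fin index_map.length)) := by
          intro i i' hii
          by_contra hne
          exact pv_rank_ne index_map i.1 i'.1 i.2 i'.2 (fun h => hne (Fin.ext h)) (by
            simpa using congrArg Fin.val hii)
        obtain ⟨i, hieq⟩ := Finite.injective_iff_surjective.mp hinj ⟨j, hj⟩
        have hrankj : pvRank index_map index_map[i.1].2 i.1 = j := congrArg Fin.val hieq
        have hmem : (index_map[i.1], i.1) ∈ index_map.zipIdx :=
          List.mem_zipIdx_iff_getElem?.mpr (by simp [List.getElem?_eq_getElem i.2])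
        have hnd : ((index_map.zipIdx).map (fun iq => pvRank index_map iq.1.2 iq.2)).Nodup := by
          refine List.Nodup.map_on ?_ (pv_zipIdx_nodup index_map 0)
          intro x hx y hy hxy
          obtain ⟨hx1, hx2⟩ := pv_mem_zipIdx hx
          obtain ⟨hy1, hy2⟩ := pv_mem_zipIdx hy
          have hxv : index_map[x.2]'hx1 = x.1 := by
            have h3 := List.getElem?_eq_getElem hx1
            rw [h3] at hx2
            exact Option.some.inj hx2
          have hyv : index_map[y.2]'hy1 = y.1 := by
            have h3 := List.getElem?_eq_getElem hy1
            rw [h3] at hy2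
            exact Option.some.inj hy2
          by_cases hxy2 : x.2 = y.2
          · have hsx : some x.1 = some y.1 := by rw [← hx2, ← hy2, hxy2]
            exact Prod.ext (Option.some.inj hsx) hxy2
          · exact absurd (by rw [hxv, hyv]; exact hxy)
              (pv_rank_ne index_map x.2 y.2 hx1 hy1 hxy2)
        have hRj := pv_scatter_getElem (fun iq => (PySem.List.pyGet? state iq.1.1).getD 'x')
          (fun iq => pvRank index_map iq.1.2 iq.2) index_map.zipIdx
          (List.replicate (index_map.length : Int).toNat (none : Option Char))
          (index_map[i.1], i.1) hnd hmem hvwN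
        simp only [] at hRj
        rw [hrankj] at hRj
        rw [hRj]
        obtain ⟨_, hsval⟩ := pv_stable index_map i.1 i.2
        rw [hrankj] at hsval
        simp [List.getElem?_map, hsval, pvChar]
      · rw [List.getElem?_eq_none, List.getElem?_eq_none]
        · simp only [List.length_map, PySem.List.length_sorted]; omega
        · rw [pv_scatter_length]; simp; omega
    rw [heq]
    simp only [pvSeq_map_some, List.nil_append, Option.bind_some]
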